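-- pv_equiv track=rewrite | github.com/techfinite-org/tfs | tfs/pdf_bt_extract.py | new_line
-- ===== SOURCE A (Python) =====
-- def new_line(text):
--     new_line = None
--     for char in text:
--         if char == ("\n" or "\r"):
--             if new_line == None:
--                 new_line = " "
--             else:
--                 new_line += " "
--             continue
--         else:
--             if new_line == None:
--                 new_line = "".join(char)
--             else:
--                 new_line += "".join(char)
--
--     return new_line
-- ===== SOURCE B (Python) =====
-- def new_line(text):
--     # one library call: replace newlines with spaces; empty input maps to None
--     return text.replace("\n", " ") or None
-- ===== Notes on version B (the rewrite author's own statement) =====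
-- stated objective: faster
-- what changed: The character-by-character accumulation loop (with its None-vs-string accumulator cases) is replaced by a single str.replace call, returning None for empty input.
import Mathlib
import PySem

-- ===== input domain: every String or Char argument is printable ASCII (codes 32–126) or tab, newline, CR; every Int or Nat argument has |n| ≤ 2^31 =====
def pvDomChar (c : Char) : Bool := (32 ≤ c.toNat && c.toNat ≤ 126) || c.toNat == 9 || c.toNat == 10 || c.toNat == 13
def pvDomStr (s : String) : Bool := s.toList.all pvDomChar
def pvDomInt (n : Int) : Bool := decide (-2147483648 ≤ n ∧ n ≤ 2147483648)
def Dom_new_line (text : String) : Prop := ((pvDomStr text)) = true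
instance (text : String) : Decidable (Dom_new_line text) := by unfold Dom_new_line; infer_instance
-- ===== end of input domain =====

-- B replaces A's character-accumulation loop by a single str.replace plus 'or None'; same return values.

-- ===== PORT A =====
-- A's loop over the characters of text, with its Option accumulator; note that
-- ("\n" or "\r") in Python evaluates to "\n", and "".join(char) is char.
def new_line (text : String) : Option String :=
  text.toList.foldl
    (fun acc c =>
      if c = '\n' then
        match acc with
        | none => some " "
        | some s => some (s ++ " ")
      else
        match acc with
        | none => some (String.ofList [c])
        | some s => some (s ++ String.ofList [c])) none

-- ===== PORT B =====
def new_line_alt (text : String) : Option String :=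
  let r := PySem.Str.replace text "\n" " "
  if r = "" then none else some r

-- ===== PRECONDITION & SPEC =====
def Spec_new_line (text : String) (out : Option String) : Prop := out = new_line_alt text
instance (text : String) (out : Option String) : Decidable (Spec_new_line text out) := by unfold Spec_new_line; infer_instance

-- ===== CLAIM (what is proved, stated in full; the proofs are below) =====
def Claim_equal_new_line : Prop := ∀ (text : String), Dom_new_line text → Spec_new_line text (new_line text)

-- ===== LEMMAS AND PROOFS =====

def pvSubst (c : Char) : Char := if c = '\n' then ' ' else c

lemma replace_go_newline (fuel : Nat) (l acc : List Char) (h : l.length ≤ fuel) :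
    PySem.Chars.replace.go ['\n'] [' '] fuel l acc = acc.reverse ++ l.map pvSubst := by
  induction fuel generalizing l acc with
  | zero =>
    have : l = [] := List.eq_nil_of_length_eq_zero (Nat.le_zero.mp h)
    subst this
    simp [PySem.Chars.replace.go]
  | succ n ih =>
    cases l with
    | nil => simp [PySem.Chars.replace.go]
    | cons c t =>
      rw [PySem.Chars.replace.go]
      by_cases hc : c = '\n'
      · subst hc
        have hp : List.isPrefixOf ['\n'] ('\n' :: t) = true := by
          simp [List.isPrefixOf]
        simp only [hp, if_pos, List.length_cons, List.length_nil, List.drop_succ_cons,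
          List.drop_zero, List.reverse_cons, List.reverse_nil, List.nil_append]
        rw [ih t ([' '] ++ acc) (by simpa using Nat.succ_le_succ_iff.mp h)]
        simp [pvSubst]
      · have hp : List.isPrefixOf ['\n'] (c :: t) = false := by
          simp [List.isPrefixOf]
          exact fun hx => hc hx.symm
        simp only [hp, Bool.false_eq_true, if_false]
        rw [ih t _ (by simpa using Nat.succ_le_succ_iff.mp h)]
        simp [pvSubst, hc]

lemma replace_newline (s : List Char) :
    PySem.Chars.replace s ['\n'] [' '] = s.map pvSubst := by
  rw [PySem.Chars.replace]
  simp only [List.isEmpty_cons, Bool.false_eq_true, if_false]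
  exact replace_go_newline s.length s [] le_rfl

lemma foldl_some (l : List Char) (cs : List Char) :
    l.foldl
      (fun acc c =>
        if c = '\n' then
          match acc with
          | none => some " "
          | some s => some (s ++ " ")
        else
          match acc with
          | none => some (String.ofList [c])
          | some s => some (s ++ String.ofList [c])) (some (String.ofList cs))
      = some (String.ofList (cs ++ l.map pvSubst)) := by
  induction l generalizing cs with
  | nil => simp
  | cons c t ih =>
    by_cases hc : c = '\n'
    · subst hc
      simp only [List.foldl_cons, reduceIte]
      have h1 : String.ofList cs ++ " " = String.ofList (cs ++ [' ']) := by
        rw [String.ofList_append]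
      rw [h1, ih]
      simp [pvSubst]
    · simp only [List.foldl_cons, if_neg hc]
      rw [← String.ofList_append, ih]
      simp [pvSubst, hc]

lemma new_line_eq (text : String) :
    new_line text = if text.toList = [] then none
      else some (String.ofList (text.toList.map pvSubst)) := by
  unfold new_line
  cases h : text.toList with
  | nil => simp
  | cons c t =>
    simp only [List.foldl_cons, if_neg (by simp : ¬ (c :: t) = [])]
    by_cases hc : c = '\n'
    · subst hc
      rw [if_pos rfl]
      have h1 : some (" " : String) = some (String.ofList [' ']) := rfl
      rw [h1, foldl_some]
      simp [pvSubst]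
    · rw [if_neg hc, foldl_some]
      simp [pvSubst, hc]

lemma alt_eq (text : String) :
    new_line_alt text = if text.toList = [] then none
      else some (String.ofList (text.toList.map pvSubst)) := by
  unfold new_line_alt
  have hr : (PySem.Str.replace text "\n" " ").toList = text.toList.map pvSubst := by
    rw [PySem.Str.toList_replace]
    exact replace_newline text.toList
  have hstr : PySem.Str.replace text "\n" " " = String.ofList (text.toList.map pvSubst) := by
    rw [← String.ofList_toList (s := PySem.Str.replace text "\n" " "), hr]
  by_cases h : text.toList = []
  · rw [if_pos h, hstr, h]
    rfl
  · rw [if_neg h, hstr, if_neg]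
    intro he
    have : text.toList.map pvSubst = [] := by
      have := congrArg String.toList he
      simpa using this
    exact h (by simpa using this)

-- ===== VERDICT (by name: the statement is the Claim_ definition above) =====
theorem new_line_spec : Claim_equal_new_line := by
  intro text _
  unfold Spec_new_line
  rw [new_line_eq, alt_eq]
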